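-- pv_equiv track=rewrite | github.com/Healura/user_management | src/auth/password_policy.py | _contains_common_pattern
-- ===== SOURCE A (Python) =====
-- def _contains_common_pattern(password: str) -> bool:
--     """
--     Check if password contains common weak patterns.
--
--     Args:
--         password: Password to check
--
--     Returns:
--         True if contains common patterns
--     """
--     common_patterns = [
--         r'123456',
--         r'password',
--         r'qwerty',
--         r'abc123',
--         r'111111',
--         r'123123',
--         r'admin',
--         r'letmein',
--         r'welcome',
--         r'monkey',
--         r'dragon',
--         r'baseball',
--         r'football',
--         r'iloveyou',
--         r'trustno1',
--         r'sunshine',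
--         r'master',
--         r'hello',
--         r'shadow',
--         r'ashley',
--         r'passw0rd',
--         r'qazwsx',
--         r'qwertyuiop',
--         r'1234567890',
--     ]
--
--     password_lower = password.lower()
--     for pattern in common_patterns:
--         if pattern in password_lower:
--             return True
--
--     # Check for sequential characters
--     if _has_sequential_chars(password):
--         return True
--
--     # Check for repeated characters
--     if _has_excessive_repeated_chars(password):
--         return True
--
--     return False
--
-- def _has_sequential_chars(password: str, threshold: int = 4) -> bool:
--     """
--     Check if password has sequential characters.
--
--     Args:
--         password: Password to check
--         threshold: Minimum length of sequence to flag
--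
--     Returns:
--         True if has sequential characters
--     """
--     for i in range(len(password) - threshold + 1):
--         sequence = password[i:i + threshold]
--
--         # Check ascending sequence
--         if all(ord(sequence[j]) == ord(sequence[j-1]) + 1 for j in range(1, len(sequence))):
--             return True
--
--         # Check descending sequence
--         if all(ord(sequence[j]) == ord(sequence[j-1]) - 1 for j in range(1, len(sequence))):
--             return True
--
--     return False
--
-- def _has_excessive_repeated_chars(password: str, threshold: int = 3) -> bool:
--     """
--     Check if password has excessive repeated characters.
--
--     Args:
--         password: Password to check
--         threshold: Maximum allowed consecutive repeated characters
--
--     Returns: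
--         True if has excessive repeated characters
--     """
--     count = 1
--     for i in range(1, len(password)):
--         if password[i] == password[i-1]:
--             count += 1
--             if count > threshold:
--                 return True
--         else:
--             count = 1
--
--     return False
-- ===== SOURCE B (Python) =====
-- _PATTERNS = [
--     '123456', 'password', 'qwerty', 'abc123', '111111', '123123',
--     'admin', 'letmein', 'welcome', 'monkey', 'dragon', 'baseball',
--     'football', 'iloveyou', 'trustno1', 'sunshine', 'master', 'hello',
--     'shadow', 'ashley', 'passw0rd', 'qazwsx', 'qwertyuiop', '1234567890',
-- ]
--
--
-- def _contains_common_pattern(password: str) -> bool: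
--     """True if the password contains a common weak pattern, a length-4
--     ascending/descending character sequence, or 4+ equal characters in a row."""
--     lower = password.lower()
--     if any(p in lower for p in _PATTERNS):
--         return True
--     up = down = rep = 1
--     for prev, cur in zip(password, password[1:]):
--         o, po = ord(cur), ord(prev)
--         up = up + 1 if o == po + 1 else 1
--         down = down + 1 if o == po - 1 else 1
--         rep = rep + 1 if cur == prev else 1
--         if up >= 4 or down >= 4 or rep >= 4:
--             return True
--     return False
-- ===== Notes on version B (the rewrite author's own statement) =====
-- stated objective: simpler
-- what changed: The windowed sequential detector (a fresh slice of 4 re-checked with two all() scans per position) and the separate repeat-counting loop are replaced by one left-to-right pass over adjacent character pairs that maintains three run-length counters (ascending, descending, repeated) and triggers as soon as one reaches 4.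
import Mathlib
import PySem

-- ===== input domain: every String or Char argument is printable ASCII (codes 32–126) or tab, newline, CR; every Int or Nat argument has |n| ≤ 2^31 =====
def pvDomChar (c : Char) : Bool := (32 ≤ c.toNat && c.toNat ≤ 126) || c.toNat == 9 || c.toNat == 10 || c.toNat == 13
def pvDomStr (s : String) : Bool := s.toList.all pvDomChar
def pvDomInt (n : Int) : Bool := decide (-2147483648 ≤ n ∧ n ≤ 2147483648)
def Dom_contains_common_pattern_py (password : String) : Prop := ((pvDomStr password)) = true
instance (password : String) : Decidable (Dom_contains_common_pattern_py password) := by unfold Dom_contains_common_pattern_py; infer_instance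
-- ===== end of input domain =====

-- B replaces A's windowed sequential scan and separate repeat loop by one pass over adjacent
-- pairs maintaining three run-length counters (objective: simpler; same pattern-list check).

-- shared data: the common-pattern list (identical literal in both Pythons)
def pvPatterns : List String :=
  ["123456", "password", "qwerty", "abc123", "111111", "123123",
   "admin", "letmein", "welcome", "monkey", "dragon", "baseball",
   "football", "iloveyou", "trustno1", "sunshine", "master", "hello",
   "shadow", "ashley", "passw0rd", "qazwsx", "qwertyuiop", "1234567890"]

-- ord(c)
def pyOrd (c : Char) : Int := c.toNat

-- ===== PORT A =====
-- body of _has_sequential_chars' window test: the two all(...) generators over the slice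
def aWinCheck (seq : List Char) : Bool :=
  ((PySem.List.pyRange 1 (seq.length : Int)).all fun j =>
      pyOrd (PySem.List.pyGetD seq j ' ') == pyOrd (PySem.List.pyGetD seq (j - 1) ' ') + 1)
  || ((PySem.List.pyRange 1 (seq.length : Int)).all fun j =>
      pyOrd (PySem.List.pyGetD seq j ' ') == pyOrd (PySem.List.pyGetD seq (j - 1) ' ') - 1)

-- _has_sequential_chars (any = the for loop's early return True)
def hasSequentialChars (password : String) (threshold : Int) : Bool :=
  (PySem.List.pyRange 0 ((password.toList.length : Int) - threshold + 1)).any fun i =>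
    aWinCheck (PySem.List.slice password.toList (some i) (some (i + threshold)))

-- _has_excessive_repeated_chars' for loop with its running count (early return = true)
def aRepLoop (cs : List Char) (threshold : Int) : List Int → Int → Bool
  | [], _ => false
  | i :: is, count =>
    if PySem.List.pyGetD cs i ' ' == PySem.List.pyGetD cs (i - 1) ' ' then
      if count + 1 > threshold then true else aRepLoop cs threshold is (count + 1)
    else aRepLoop cs threshold is 1

def hasExcessiveRepeatedChars (password : String) (threshold : Int) : Bool :=
  aRepLoop password.toList threshold (PySem.List.pyRange 1 (password.toList.length : Int)) 1

def contains_common_pattern_py (password : String) : Bool :=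
  let lower := PySem.Str.lower password
  if pvPatterns.any (fun p => PySem.Str.isIn p lower) then true
  else if hasSequentialChars password 4 then true
  else if hasExcessiveRepeatedChars password 3 then true
  else false

-- ===== PORT B =====
-- the single pass over zip(password, password[1:]) with three run counters
def bRunLoop : Char → Int → Int → Int → List Char → Bool
  | _, _, _, _, [] => false
  | prev, up, down, rep, cur :: rest =>
    let up' := if pyOrd cur == pyOrd prev + 1 then up + 1 else 1
    let down' := if pyOrd cur == pyOrd prev - 1 then down + 1 else 1
    let rep' := if cur == prev then rep + 1 else 1
    if up' ≥ 4 || down' ≥ 4 || rep' ≥ 4 then true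
    else bRunLoop cur up' down' rep' rest

def contains_common_pattern_py_alt (password : String) : Bool :=
  let lower := PySem.Str.lower password
  if pvPatterns.any (fun p => PySem.Str.isIn p lower) then true
  else
    match password.toList with
    | [] => false
    | c :: rest => bRunLoop c 1 1 1 rest

-- ===== PRECONDITION & SPEC =====
def Spec_contains_common_pattern_py (password : String) (out : Bool) : Prop := out = contains_common_pattern_py_alt password
instance (password : String) (out : Bool) : Decidable (Spec_contains_common_pattern_py password out) := by unfold Spec_contains_common_pattern_py; infer_instance

-- ===== CLAIM (what is proved, stated in full; the proofs are below) =====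
def Claim_equal_contains_common_pattern_py : Prop := ∀ (password : String), Dom_contains_common_pattern_py password → Spec_contains_common_pattern_py password (contains_common_pattern_py password)

-- ===== LEMMAS AND PROOFS =====

-- the three run-step predicates
def pA (prev cur : Char) : Bool := pyOrd cur == pyOrd prev + 1
def pD (prev cur : Char) : Bool := pyOrd cur == pyOrd prev - 1
def pE (prev cur : Char) : Bool := cur == prev

-- m consecutive p-steps starting at prev
def extendRun (p : Char → Char → Bool) : Nat → Char → List Char → Bool
  | 0, _, _ => true
  | _ + 1, _, [] => false
  | m + 1, prev, c :: rest => p prev c && extendRun p m c rest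

-- some position starts 4 characters linked by p
def hasRun (p : Char → Char → Bool) : List Char → Bool
  | [] => false
  | a :: rest => extendRun p 3 a rest || hasRun p rest

-- single-counter run loop: common shape of A's repeat loop and each of B's counters
def sLoop (p : Char → Char → Bool) : Char → Int → List Char → Bool
  | _, _, [] => false
  | prev, cnt, c :: rest =>
    let cnt' := if p prev c then cnt + 1 else 1
    if cnt' ≥ 4 then true else sLoop p c cnt' rest

lemma extendRun_mono (p : Char → Char → Bool) :
    ∀ (m' m : Nat) (prev : Char) (rest : List Char), m ≤ m' →
      extendRun p m' prev rest = true → extendRun p m prev rest = true := by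
  intro m'
  induction m' with
  | zero => intro m prev rest h hr; interval_cases m; exact hr
  | succ k ih =>
    intro m prev rest h hr
    cases m with
    | zero => rfl
    | succ m =>
      cases rest with
      | nil => simp [extendRun] at hr
      | cons c rs =>
        simp [extendRun] at hr ⊢
        exact ⟨hr.1, ih m c rs (by omega) hr.2⟩

lemma sLoop_eq (p : Char → Char → Bool) :
    ∀ (rest : List Char) (prev : Char) (cnt : Int), 1 ≤ cnt → cnt ≤ 3 →
      sLoop p prev cnt rest = (extendRun p (4 - cnt).toNat prev rest || hasRun p rest) := by
  intro rest
  induction rest with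
  | nil =>
    intro prev cnt h1 h3
    have h4 : (4 - cnt).toNat = ((4 - cnt).toNat - 1) + 1 := by omega
    rw [sLoop, h4, extendRun, hasRun]
    simp
  | cons c rs ih =>
    intro prev cnt h1 h3
    have h4 : (4 - cnt).toNat = (3 - cnt).toNat + 1 := by omega
    rw [sLoop, h4, extendRun, hasRun]
    by_cases hp : p prev c = true
    · simp only [hp, if_true, Bool.true_and]
      by_cases hc : cnt = 3
      · subst hc
        rw [if_pos (by omega : ((3:Int) + 1) ≥ 4)]
        simp [extendRun]
      · rw [if_neg (by omega : ¬ ((cnt + 1) ≥ 4)), ih c (cnt + 1) (by omega) (by omega)]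
        have he : (4 - (cnt + 1)).toNat = (3 - cnt).toNat := by omega
        rw [he]
        by_cases h3r : extendRun p 3 c rs = true
        · have := extendRun_mono p 3 (3 - cnt).toNat c rs (by omega) h3r
          simp [this, h3r]
        · simp only [Bool.not_eq_true] at h3r
          simp [h3r]
    · simp only [Bool.not_eq_true] at hp
      simp only [hp, Bool.false_eq_true, if_false, Bool.false_and, Bool.false_or]
      rw [if_neg (by omega : ¬ ((1:Int) ≥ 4)), ih c 1 (by omega) (by omega)]
      simp

-- B's three-counter pass is the disjunction of three single-counter loops
lemma bRunLoop_eq (rest : List Char) :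
    ∀ (prev : Char) (u d r : Int),
      bRunLoop prev u d r rest = (sLoop pA prev u rest || sLoop pD prev d rest || sLoop pE prev r rest) := by
  induction rest with
  | nil => intro prev u d r; rfl
  | cons c rs ih =>
    intro prev u d r
    rw [bRunLoop, sLoop, sLoop, sLoop]
    simp only [pA, pD, pE]
    split_ifs <;>
      first
        | rfl
        | (exact ih c _ _ _)
        | simp_all

-- getD of the marked element of an append
lemma getD_append_len {α : Type} (pre : List α) (x : α) (suf : List α) (d : α) :
    (pre ++ x :: suf).getD pre.length d = x := by
  simp [List.getD]

-- A's repeat loop over indices = the single-counter loop over the suffix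
lemma aRepLoop_eq :
    ∀ (rest pre : List Char) (prev : Char) (cnt : Int),
      aRepLoop (pre ++ prev :: rest) 3
        (PySem.List.pyRange ((pre.length : Int) + 1) (((pre ++ prev :: rest).length : Int))) cnt
      = sLoop pE prev cnt rest := by
  intro rest
  induction rest with
  | nil =>
    intro pre prev cnt
    rw [PySem.List.pyRange_one_eq_nil (by simp)]
    rfl
  | cons c rs ih =>
    intro pre prev cnt
    have hlen : ((pre.length : Int) + 1) < ((pre ++ prev :: c :: rs).length : Int) := by
      simp
    rw [PySem.List.pyRange_one_cons hlen, aRepLoop]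
    have e1 : PySem.List.pyGetD (pre ++ prev :: c :: rs) ((pre.length : Int) + 1) ' ' = c := by
      have h : ((pre.length : Int) + 1) = ((pre.length + 1 : Nat) : Int) := by push_cast; ring
      rw [h, PySem.List.pyGetD_natCast]
      have h2 : pre ++ prev :: c :: rs = (pre ++ [prev]) ++ c :: rs := by simp
      rw [h2, show pre.length + 1 = (pre ++ [prev]).length by simp]
      exact getD_append_len _ _ _ _
    have e2 : PySem.List.pyGetD (pre ++ prev :: c :: rs) ((pre.length : Int) + 1 - 1) ' ' = prev := by
      have h : ((pre.length : Int) + 1 - 1) = ((pre.length : Nat) : Int) := by ring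
      rw [h, PySem.List.pyGetD_natCast]
      exact getD_append_len _ _ _ _
    have hrec : ∀ k : Int,
        aRepLoop (pre ++ prev :: c :: rs) 3
          (PySem.List.pyRange ((pre.length : Int) + 1 + 1) ((pre ++ prev :: c :: rs).length : Int)) k
        = sLoop pE c k rs := by
      intro k
      have hl : ((pre.length : Int) + 1 + 1) = (((pre ++ [prev]).length : Int) + 1) := by
        simp
      rw [hl, show pre ++ prev :: c :: rs = (pre ++ [prev]) ++ c :: rs from by simp]
      exact ih (pre ++ [prev]) c k
    rw [e1, e2, sLoop]
    by_cases hpe : (c == prev) = true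
    · simp only [pE, hpe, if_true]
      by_cases hc : cnt + 1 > 3
      · rw [if_pos hc, if_pos (by omega : (cnt + 1) ≥ 4)]
      · rw [if_neg hc, if_neg (by omega : ¬ ((cnt + 1) ≥ 4))]
        exact hrec (cnt + 1)
    · simp only [pE, hpe, Bool.false_eq_true, if_false]
      rw [if_neg (by omega : ¬ ((1:Int) ≥ 4))]
      exact hrec 1

-- the Nat-index form of A's window scan
def gSeq (cs : List Char) : Bool :=
  (List.range (cs.length - 3)).any fun k => aWinCheck ((cs.drop k).take 4)

lemma hasSequentialChars_eq_gSeq (s : String) : hasSequentialChars s 4 = gSeq s.toList := by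
  unfold hasSequentialChars gSeq
  generalize s.toList = cs
  by_cases h : cs.length ≥ 3
  · have h1 : ((cs.length : Int) - 4 + 1) = ((cs.length - 3 : Nat) : Int) := by push_cast [h]; ring
    rw [h1, PySem.List.pyRange_zero_natCast, List.any_map]
    refine List.any_congr rfl fun k => ?_
    have h2 : ((k : Int) + 4) = ((k : Int) + ((4 : Nat) : Int)) := by norm_num
    simp only [Function.comp_apply, h2, PySem.List.slice_natCast_add]
  · have h1 : ((cs.length : Int) - 4 + 1) ≤ 0 := by omega
    rw [PySem.List.pyRange_one_eq_nil h1, show cs.length - 3 = 0 from by omega]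
    rfl

lemma aWinCheck_four (a b c d : Char) :
    aWinCheck [a, b, c, d] = ((pA a b && pA b c && pA c d) || (pD a b && pD b c && pD c d)) := by
  have hr : PySem.List.pyRange 1 (([a, b, c, d].length : Int)) = [1, 2, 3] := by
    show PySem.List.pyRange 1 (((4 : Nat) : Int)) = [1, 2, 3]
    norm_num
    decide
  rw [aWinCheck, hr]
  simp only [List.all_cons, List.all_nil,
    show (1:Int) - 1 = 0 from by norm_num, show (2:Int) - 1 = 1 from by norm_num,
    show (3:Int) - 1 = 2 from by norm_num, PySem.List.pyGetD_ofNat']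
  simp [pA, pD, List.getD, Bool.and_assoc]

lemma extendRun_short (p : Char → Char → Bool) :
    ∀ (m : Nat) (prev : Char) (rest : List Char), rest.length < m →
      extendRun p m prev rest = false := by
  intro m
  induction m with
  | zero => intro _ _ h; omega
  | succ k ih =>
    intro prev rest h
    cases rest with
    | nil => rfl
    | cons c rs =>
      simp only [extendRun, Bool.and_eq_false_iff]
      right
      exact ih c rs (by simp at h; omega)

lemma hasRun_short (p : Char → Char → Bool) :
    ∀ (cs : List Char), cs.length < 4 → hasRun p cs = false := by
  intro cs
  induction cs with
  | nil => intro _; rfl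
  | cons a rest ih =>
    intro h
    rw [hasRun, extendRun_short p 3 a rest (by simp at h; omega), ih (by simp at h; omega)]
    rfl

lemma extendRun_three (p : Char → Char → Bool) (x b c d : Char) (t : List Char) :
    extendRun p 3 x (b :: c :: d :: t) = (p x b && p b c && p c d) := by
  simp [extendRun, Bool.and_assoc]

lemma gSeq_eq : ∀ (cs : List Char), gSeq cs = (hasRun pA cs || hasRun pD cs) := by
  intro cs
  induction cs with
  | nil => rfl
  | cons x xs ih =>
    by_cases h : xs.length ≥ 3
    · obtain ⟨b, c, d, t, rfl⟩ : ∃ b c d t, xs = b :: c :: d :: t := by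
        match xs, h with
        | b :: c :: d :: t, _ => exact ⟨b, c, d, t, rfl⟩
      rw [gSeq, show (x :: b :: c :: d :: t).length - 3 = (t.length + 3 - 3) + 1 from by simp,
        List.range_succ_eq_map, List.any_cons, List.any_map]
      have hg : ((List.range (t.length + 3 - 3)).any fun k =>
          ((fun k => aWinCheck ((List.drop k (x :: b :: c :: d :: t)).take 4)) ∘ Nat.succ) k)
          = gSeq (b :: c :: d :: t) := by
        rw [gSeq]
        refine List.any_congr (by simp) fun k => ?_
        simp [Function.comp]
      rw [hg, ih]
      simp only [List.drop_zero, List.take_succ_cons, List.take_zero, aWinCheck_four]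
      rw [show hasRun pA (x :: b :: c :: d :: t)
            = (extendRun pA 3 x (b :: c :: d :: t) || hasRun pA (b :: c :: d :: t)) from rfl,
          show hasRun pD (x :: b :: c :: d :: t)
            = (extendRun pD 3 x (b :: c :: d :: t) || hasRun pD (b :: c :: d :: t)) from rfl,
          extendRun_three, extendRun_three]
      cases pA x b && pA b c && pA c d <;> cases pD x b && pD b c && pD c d <;>
        cases hasRun pA (b :: c :: d :: t) <;> cases hasRun pD (b :: c :: d :: t) <;> rfl
    · have h4 : (x :: xs).length < 4 := by simp at h ⊢; omega
      rw [hasRun_short pA _ h4, hasRun_short pD _ h4, gSeq,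
        show (x :: xs).length - 3 = 0 from by simp at h ⊢; omega]
      rfl

-- ===== VERDICT (by name: the statement is the Claim_ definition above) =====
theorem contains_common_pattern_py_spec : Claim_equal_contains_common_pattern_py := by
  intro password _
  unfold Spec_contains_common_pattern_py contains_common_pattern_py contains_common_pattern_py_alt
  by_cases hpat : pvPatterns.any (fun p => PySem.Str.isIn p (PySem.Str.lower password)) = true
  · simp only [hpat, if_true]
  · simp only [Bool.not_eq_true] at hpat
    simp only [hpat, Bool.false_eq_true, if_false]
    have hseq : hasSequentialChars password 4
        = (hasRun pA password.toList || hasRun pD password.toList) := by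
      rw [hasSequentialChars_eq_gSeq, gSeq_eq]
    cases hcs : password.toList with
    | nil =>
        rw [hcs] at hseq
        have hrep : hasExcessiveRepeatedChars password 3 = false := by
          unfold hasExcessiveRepeatedChars
          rw [hcs]
          rfl
        simp [hseq, hrep, hasRun]
    | cons c rest =>
        rw [hcs] at hseq
        have hrep : hasExcessiveRepeatedChars password 3 = hasRun pE (c :: rest) := by
          unfold hasExcessiveRepeatedChars
          rw [hcs]
          have h := aRepLoop_eq rest [] c 1
          simp only [List.nil_append, List.length_nil, Nat.cast_zero, zero_add] at h
          rw [h, sLoop_eq pE rest c 1 (by omega) (by omega),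
            show ((4:Int) - 1).toNat = 3 from rfl]
          rfl
        rw [hseq, hrep]
        show _ = bRunLoop c 1 1 1 rest
        rw [bRunLoop_eq rest c 1 1 1,
          sLoop_eq pA rest c 1 (by omega) (by omega),
          sLoop_eq pD rest c 1 (by omega) (by omega),
          sLoop_eq pE rest c 1 (by omega) (by omega),
          show ((4:Int) - 1).toNat = 3 from rfl,
          show hasRun pA (c :: rest) = (extendRun pA 3 c rest || hasRun pA rest) from rfl,
          show hasRun pD (c :: rest) = (extendRun pD 3 c rest || hasRun pD rest) from rfl,
          show hasRun pE (c :: rest) = (extendRun pE 3 c rest || hasRun pE rest) from rfl]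
        cases extendRun pA 3 c rest <;> cases hasRun pA rest <;>
          cases extendRun pD 3 c rest <;> cases hasRun pD rest <;>
          cases extendRun pE 3 c rest <;> cases hasRun pE rest <;> rfl
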